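-- pv_equiv track=rewrite | github.com/Iron-Boyy/UI-RAG | RetrievalSystem/docsplitter/basespilter.py | combine_tokens
-- ===== SOURCE A (Python) =====
-- def combine_tokens(tokens, max_length):
--     combined = []
--     current_chunk = []
--     sentence_endings = {'.', '!', '?', '。', '！', '？'}
--
--     for token in tokens:
--         if token.isspace():
--             current_chunk.append(token)
--             continue
--
--         current_chunk.append(token)
--         if len([t for t in current_chunk if not t.isspace()]) > max_length:
--             # 查找最后一个标点符号的位置
--             last_punct_idx = max((idx for idx, t in enumerate(current_chunk) if t in sentence_endings), default=None)
--             if last_punct_idx is not None: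
--                 # 在最后一个标点符号处分割
--                 combined.append(''.join(current_chunk[:last_punct_idx + 1]))
--                 current_chunk = current_chunk[last_punct_idx + 1:]
--             else:
--                 # 如果没有找到标点符号，强制分割
--                 combined.append(''.join(current_chunk[:-1]))
--                 current_chunk = current_chunk[-1:]
--
--     if current_chunk:
--         combined.append(''.join(current_chunk))
--
--     return combined
-- ===== SOURCE B (Python) =====
-- def combine_tokens(tokens, max_length):
--     # Single pass keeping the chunk's non-space count and last-punctuation
--     # position incrementally instead of rescanning the chunk each step.
--     sentence_endings = {'.', '!', '?', '。', '！', '？'}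
--     combined = []
--     chunk = []
--     nonspace = 0            # non-space tokens currently in chunk
--     punct_idx = None        # index of last sentence-ending token in chunk
--     punct_nonspace = 0      # non-space tokens in chunk[:punct_idx + 1]
--     for token in tokens:
--         chunk.append(token)
--         if token.isspace():
--             continue
--         nonspace += 1
--         if token in sentence_endings:
--             punct_idx = len(chunk) - 1
--             punct_nonspace = nonspace
--         if nonspace > max_length:
--             if punct_idx is not None:
--                 combined.append(''.join(chunk[:punct_idx + 1]))
--                 chunk = chunk[punct_idx + 1:]
--                 nonspace -= punct_nonspace
--                 punct_idx = None
--                 punct_nonspace = 0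
--             else:
--                 combined.append(''.join(chunk[:-1]))
--                 chunk = [token]
--                 nonspace = 1
--     if chunk:
--         combined.append(''.join(chunk))
--     return combined
-- ===== Notes on version B (the rewrite author's own statement) =====
-- stated objective: faster
-- what changed: A rescans the whole current chunk on every token (recounting non-space tokens and re-running max over all punctuation indices); B is a single pass that maintains the non-space count, the last-punctuation index and the non-space count up to it incrementally.
import Mathlib
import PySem

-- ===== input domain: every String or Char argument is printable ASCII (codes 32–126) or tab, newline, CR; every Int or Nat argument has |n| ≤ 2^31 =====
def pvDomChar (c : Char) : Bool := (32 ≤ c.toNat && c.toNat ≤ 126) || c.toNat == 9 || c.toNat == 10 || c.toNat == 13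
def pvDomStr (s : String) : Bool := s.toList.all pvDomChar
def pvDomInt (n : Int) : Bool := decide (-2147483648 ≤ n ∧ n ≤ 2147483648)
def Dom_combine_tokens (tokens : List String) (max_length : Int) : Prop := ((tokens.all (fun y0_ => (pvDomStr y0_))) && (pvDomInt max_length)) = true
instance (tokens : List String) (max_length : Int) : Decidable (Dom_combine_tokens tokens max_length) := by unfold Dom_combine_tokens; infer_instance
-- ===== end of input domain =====

-- B replaces A's per-token rescan of the chunk (non-space recount + max over all
-- punctuation indices) by incrementally maintained counters: asymptotically faster.

-- the sentence_endings set (a fixed 6-element literal in both Pythons)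
def pvEndings : List String := [".", "!", "?", "。", "！", "？"]

-- ===== PORT A =====
-- len([t for t in current_chunk if not t.isspace()])
def pvNS (chunk : List String) : Int :=
  ((chunk.filter (fun t => !PySem.Str.strIsspace t)).length : Int)

-- max((idx for idx, t in enumerate(chunk) if t in sentence_endings), default=None)
def pvLastPunct (chunk : List String) : Option Int :=
  (PySem.List.enumerate chunk 0).foldl
    (fun acc it =>
      if it.2 ∈ pvEndings then
        some (match acc with | none => it.1 | some m => max m it.1)
      else acc) none

def combine_tokens (tokens : List String) (max_length : Int) : List String :=
  let st := tokens.foldl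
    (fun (st : List String × List String) token =>
      if PySem.Str.strIsspace token then (st.1, st.2 ++ [token])
      else
        let chunk := st.2 ++ [token]
        if pvNS chunk > max_length then
          match pvLastPunct chunk with
          | some p =>
              (st.1 ++ [PySem.Str.join "" (PySem.List.slice chunk none (some (p + 1)))],
               PySem.List.slice chunk (some (p + 1)) none)
          | none =>
              (st.1 ++ [PySem.Str.join "" (PySem.List.slice chunk none (some (-1)))],
               PySem.List.slice chunk (some (-1)) none)
        else (st.1, chunk))
    ([], [])
  if st.2 ≠ [] then st.1 ++ [PySem.Str.join "" st.2] else st.1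

-- ===== PORT B =====
-- state: (combined, chunk, nonspace, punct_idx, punct_nonspace)
def pvStepB (max_length : Int)
    (st : List String × List String × Int × Option Int × Int) (token : String) :
    List String × List String × Int × Option Int × Int :=
  let combined := st.1
  let chunk := st.2.1 ++ [token]
  if PySem.Str.strIsspace token then (combined, chunk, st.2.2.1, st.2.2.2.1, st.2.2.2.2)
  else
    let nonspace := st.2.2.1 + 1
    let pp : Option Int × Int :=
      if token ∈ pvEndings then (some ((chunk.length : Int) - 1), nonspace)
      else (st.2.2.2.1, st.2.2.2.2)
    if nonspace > max_length then
      match pp.1 with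
      | some q =>
          (combined ++ [PySem.Str.join "" (PySem.List.slice chunk none (some (q + 1)))],
           PySem.List.slice chunk (some (q + 1)) none, nonspace - pp.2, none, 0)
      | none =>
          (combined ++ [PySem.Str.join "" (PySem.List.slice chunk none (some (-1)))],
           [token], 1, none, 0)
    else (combined, chunk, nonspace, pp.1, pp.2)

def combine_tokens_alt (tokens : List String) (max_length : Int) : List String :=
  let st := tokens.foldl (pvStepB max_length) ([], [], 0, none, 0)
  if st.2.1 ≠ [] then st.1 ++ [PySem.Str.join "" st.2.1] else st.1

-- ===== PRECONDITION & SPEC =====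
def Spec_combine_tokens (tokens : List String) (max_length : Int) (out : List String) : Prop := out = combine_tokens_alt tokens max_length
instance (tokens : List String) (max_length : Int) (out : List String) : Decidable (Spec_combine_tokens tokens max_length out) := by unfold Spec_combine_tokens; infer_instance

-- ===== CLAIM (what is proved, stated in full; the proofs are below) =====
def Claim_equal_combine_tokens : Prop := ∀ (tokens : List String) (max_length : Int), Dom_combine_tokens tokens max_length → Spec_combine_tokens tokens max_length (combine_tokens tokens max_length)

-- ===== LEMMAS AND PROOFS =====

-- A's step, named for the proofs below
def pvStepA (max_length : Int) (st : List String × List String) (token : String) :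
    List String × List String :=
  if PySem.Str.strIsspace token then (st.1, st.2 ++ [token])
  else
    let chunk := st.2 ++ [token]
    if pvNS chunk > max_length then
      match pvLastPunct chunk with
      | some p =>
          (st.1 ++ [PySem.Str.join "" (PySem.List.slice chunk none (some (p + 1)))],
           PySem.List.slice chunk (some (p + 1)) none)
      | none =>
          (st.1 ++ [PySem.Str.join "" (PySem.List.slice chunk none (some (-1)))],
           PySem.List.slice chunk (some (-1)) none)
    else (st.1, chunk)

theorem pvLastPunct_bound : ∀ (l : List String) (m : Int),
    pvLastPunct l = some m → 0 ≤ m ∧ m < l.length := by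
  intro l
  induction l using List.reverseRecOn with
  | nil => intro m h; simp [pvLastPunct, PySem.List.enumerate] at h
  | append_singleton l t ih =>
    intro m h
    rw [pvLastPunct, PySem.List.enumerate_append, List.foldl_append] at h
    simp [PySem.List.enumerate] at h
    by_cases ht : t ∈ pvEndings
    · simp [ht] at h
      rcases hp : pvLastPunct l with _ | m'
      · rw [pvLastPunct] at hp; rw [hp] at h
        simp at h
        simp [← h]
      · rw [pvLastPunct] at hp; rw [hp] at h
        simp at h
        have := ih m' hp
        simp [← h]
        omega
    · simp [ht] at h
      have := ih m (by rw [pvLastPunct]; exact h)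
      simp
      omega

theorem pvLastPunct_append (l : List String) (t : String) :
    pvLastPunct (l ++ [t]) =
      if t ∈ pvEndings then some (l.length : Int) else pvLastPunct l := by
  rw [pvLastPunct, PySem.List.enumerate_append, List.foldl_append]
  simp only [PySem.List.enumerate, List.foldl]
  by_cases ht : t ∈ pvEndings
  · simp only [ht, if_pos, zero_add]
    rcases hp : pvLastPunct l with _ | m
    · rw [pvLastPunct] at hp; rw [hp]
    · rw [pvLastPunct] at hp; rw [hp]
      have := pvLastPunct_bound l m hp
      simp
      omega
  · simp only [ht, if_neg, not_false_iff]
    rfl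

theorem pvLastPunct_drop : ∀ (l : List String) (m : Int),
    pvLastPunct l = some m → pvLastPunct (l.drop (m + 1).toNat) = none := by
  intro l
  induction l using List.reverseRecOn with
  | nil => intro m h; simp [pvLastPunct, PySem.List.enumerate] at h
  | append_singleton l t ih =>
    intro m h
    rw [pvLastPunct_append] at h
    by_cases ht : t ∈ pvEndings
    · rw [if_pos ht] at h
      have hm : m = (l.length : Int) := (Option.some.inj h).symm
      have h1 : (m + 1).toNat = l.length + 1 := by omega
      rw [h1, List.drop_eq_nil_of_le (by simp)]
      simp [pvLastPunct, PySem.List.enumerate]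
    · rw [if_neg ht] at h
      have hb := pvLastPunct_bound l m h
      have hle : (m + 1).toNat ≤ l.length := by omega
      rw [List.drop_append_of_le_length hle, pvLastPunct_append, if_neg ht, ih m h]

theorem pvNS_append (l : List String) (t : String) :
    pvNS (l ++ [t]) = pvNS l + (if PySem.Str.strIsspace t then 0 else 1) := by
  simp only [pvNS, List.filter_append, List.length_append]
  by_cases h : PySem.Str.strIsspace t
  · have h' : PySem.Chars.strIsspace t.toList = true := by simpa using h
    simp [h']
  · have h' : PySem.Chars.strIsspace t.toList = false := by simpa using h
    simp [h']

theorem pvNS_take_add_drop (l : List String) (n : Nat) :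
    pvNS (l.take n) + pvNS (l.drop n) = pvNS l := by
  simp only [pvNS]
  conv_rhs => rw [← List.take_append_drop n l]
  rw [List.filter_append, List.length_append]
  push_cast
  ring

theorem pvSpace_not_ending (t : String) (h : PySem.Str.strIsspace t = true) :
    t ∉ pvEndings := by
  intro hm
  simp [pvEndings] at hm
  rcases hm with h' | h' | h' | h' | h' | h' <;> subst h' <;> simp at h <;> revert h <;> decide

-- the coupling invariant between A's state and B's state
def pvInv (ast : List String × List String)
    (bst : List String × List String × Int × Option Int × Int) : Prop :=
  bst.1 = ast.1 ∧ bst.2.1 = ast.2 ∧ bst.2.2.1 = pvNS ast.2 ∧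
  bst.2.2.2.1 = pvLastPunct ast.2 ∧
  (∀ q : Int, pvLastPunct ast.2 = some q → bst.2.2.2.2 = pvNS (ast.2.take (q + 1).toNat))

theorem pvStep_inv (max_length : Int) (ast : List String × List String)
    (bst : List String × List String × Int × Option Int × Int) (t : String)
    (h : pvInv ast bst) : pvInv (pvStepA max_length ast t) (pvStepB max_length bst t) := by
  obtain ⟨h1, h2, h3, h4, h5⟩ := h
  by_cases hsp : PySem.Str.strIsspace t
  · -- whitespace token: both just append
    simp only [pvStepA, pvStepB, hsp, if_pos]
    refine ⟨h1, by rw [h2], ?_, ?_, ?_⟩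
    · rw [h3, pvNS_append, if_pos hsp]; ring
    · rw [h4, pvLastPunct_append, if_neg (pvSpace_not_ending t hsp)]
    · intro q hq
      rw [pvLastPunct_append, if_neg (pvSpace_not_ending t hsp)] at hq
      have hb := pvLastPunct_bound _ _ hq
      rw [List.take_append_of_le_length (by omega)]
      exact h5 q hq
  · -- non-space token
    simp only [pvStepA, pvStepB, hsp, if_neg, Bool.false_eq_true, not_false_iff]
    rw [h2]
    set chunk := ast.2 ++ [t] with hchunk
    have hns : pvNS chunk = bst.2.2.1 + 1 := by
      rw [hchunk, pvNS_append, if_neg hsp, h3]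
    have hlp : pvLastPunct chunk =
        (if t ∈ pvEndings then (some ((chunk.length : Int) - 1), bst.2.2.1 + 1)
         else (bst.2.2.2.1, bst.2.2.2.2)).1 := by
      by_cases hte : t ∈ pvEndings
      · simp [hte, pvLastPunct_append, hchunk]
      · simp [hte, pvLastPunct_append, hchunk, h4]
    have hpns : ∀ q : Int, pvLastPunct chunk = some q →
        (if t ∈ pvEndings then (some ((chunk.length : Int) - 1), bst.2.2.1 + 1)
         else (bst.2.2.2.1, bst.2.2.2.2)).2 = pvNS (chunk.take (q + 1).toNat) := by
      intro q hq
      by_cases hte : t ∈ pvEndings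
      · rw [hchunk, pvLastPunct_append, if_pos hte] at hq
        have hq' : q = (ast.2.length : Int) := (Option.some.inj hq).symm
        simp only [hte, if_pos]
        have h1' : (q + 1).toNat = ast.2.length + 1 := by omega
        rw [h1', List.take_of_length_le (by simp [hchunk])]
        rw [hns]
      · rw [hchunk, pvLastPunct_append, if_neg hte] at hq
        simp only [hte, if_neg, not_false_iff]
        have hb := pvLastPunct_bound _ _ hq
        rw [hchunk, List.take_append_of_le_length (by omega)]
        exact h5 q hq
    rw [← hns] at hlp hpns ⊢
    rw [← hlp]
    by_cases hcond : pvNS chunk > max_length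
    · rw [if_pos hcond, if_pos hcond]
      rcases hq : pvLastPunct chunk with _ | q
      · -- forced split: no punctuation in the chunk
        have htne : t ∉ pvEndings := by
          intro hte
          rw [hchunk, pvLastPunct_append, if_pos hte] at hq
          simp at hq
        have hdt : List.drop (chunk.length - 1) chunk = [t] := by rw [hchunk]; simp
        refine ⟨by rw [h1], ?_, ?_, ?_, ?_⟩
        · rw [PySem.List.slice_from_neg_one, hdt]
        · show (1 : Int) = pvNS (PySem.List.slice chunk (some (-1)) none)
          rw [PySem.List.slice_from_neg_one, hdt]
          have h' : PySem.Chars.strIsspace t.toList = false := by simpa using hsp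
          simp [pvNS, h']
        · show (none : Option Int) = pvLastPunct (PySem.List.slice chunk (some (-1)) none)
          rw [PySem.List.slice_from_neg_one, hdt,
            show ([t] : List String) = [] ++ [t] by simp, pvLastPunct_append, if_neg htne]
          simp [pvLastPunct, PySem.List.enumerate]
        · intro q hq'
          rw [PySem.List.slice_from_neg_one, hdt,
            show ([t] : List String) = [] ++ [t] by simp, pvLastPunct_append, if_neg htne] at hq'
          exact absurd hq' (by simp [pvLastPunct, PySem.List.enumerate])
      · -- split at the last punctuation index
        have hb := pvLastPunct_bound _ _ hq
        have hdrop : PySem.List.slice chunk (some (q + 1)) none = chunk.drop (q + 1).toNat :=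
          PySem.List.slice_from chunk (by omega)
        have hzero : pvLastPunct (PySem.List.slice chunk (some (q + 1)) none) = none := by
          rw [hdrop]; exact pvLastPunct_drop chunk q hq
        refine ⟨by rw [h1], rfl, ?_, hzero.symm, ?_⟩
        · show pvNS chunk - _ = pvNS (PySem.List.slice chunk (some (q + 1)) none)
          rw [hpns q hq, hdrop]
          have := pvNS_take_add_drop chunk (q + 1).toNat
          omega
        · intro q' hq'
          rw [hzero] at hq'
          simp at hq'
    · rw [if_neg hcond, if_neg hcond]
      exact ⟨h1, rfl, rfl, rfl, hpns⟩

theorem pvFold_inv (max_length : Int) : ∀ (ts : List String)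
    (ast : List String × List String)
    (bst : List String × List String × Int × Option Int × Int),
    pvInv ast bst →
    pvInv (ts.foldl (pvStepA max_length) ast) (ts.foldl (pvStepB max_length) bst) := by
  intro ts
  induction ts with
  | nil => intro ast bst h; exact h
  | cons t ts ih =>
    intro ast bst h
    exact ih _ _ (pvStep_inv max_length ast bst t h)

-- ===== VERDICT (by name: the statement is the Claim_ definition above) =====
theorem combine_tokens_spec : Claim_equal_combine_tokens := by
  intro tokens max_length _
  unfold Spec_combine_tokens combine_tokens combine_tokens_alt
  have h0 : pvInv ([], []) ([], [], 0, none, 0) := by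
    refine ⟨rfl, rfl, rfl, rfl, ?_⟩
    intro q hq
    exact absurd hq (by simp [pvLastPunct, PySem.List.enumerate])
  have h := pvFold_inv max_length tokens ([], []) ([], [], 0, none, 0) h0
  obtain ⟨h1, h2, -, -, -⟩ := h
  have hA : tokens.foldl
      (fun (st : List String × List String) token =>
        if PySem.Str.strIsspace token then (st.1, st.2 ++ [token])
        else
          let chunk := st.2 ++ [token]
          if pvNS chunk > max_length then
            match pvLastPunct chunk with
            | some p =>
                (st.1 ++ [PySem.Str.join "" (PySem.List.slice chunk none (some (p + 1)))],
                 PySem.List.slice chunk (some (p + 1)) none)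
            | none =>
                (st.1 ++ [PySem.Str.join "" (PySem.List.slice chunk none (some (-1)))],
                 PySem.List.slice chunk (some (-1)) none)
          else (st.1, chunk)) ([], [])
      = tokens.foldl (pvStepA max_length) ([], []) := by
    rfl
  rw [hA]
  simp only [h1, h2]
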